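-- pv_equiv track=rewrite | github.com/NoopurY/interview_analyser | ai-interview-analyzer/backend/utils/audio_processor.py | _count_pauses
-- ===== SOURCE A (Python) =====
-- def _count_pauses(silence_frames, min_pause_frames: int = 10) -> int:
--     """Count distinct pauses from silence frame array."""
--     count = 0
--     in_pause = False
--     pause_len = 0
--     for is_silent in silence_frames:
--         if is_silent:
--             pause_len += 1
--             in_pause = True
--         else:
--             if in_pause and pause_len >= min_pause_frames:
--                 count += 1
--             in_pause = False
--             pause_len = 0
--     return count
-- ===== SOURCE B (Python) =====
-- from itertools import groupby
--
-- def _count_pauses(silence_frames, min_pause_frames: int = 10) -> int: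
--     """Count distinct pauses from silence frame array."""
--     groups = [(key, sum(1 for _ in g)) for key, g in groupby(silence_frames, key=bool)]
--     # A trailing silent run is never followed by speech, so it is not counted.
--     return sum(1 for is_silent, n in groups[:-1] if is_silent and n >= min_pause_frames)
-- ===== Notes on version B (the rewrite author's own statement) =====
-- stated objective: idiomatic
-- what changed: Replaces A's stateful count/in_pause/pause_len scan by building the (value, run-length) groups with itertools.groupby and counting the qualifying silent groups among all but the last (a trailing silent run is never followed by speech, so A never counts it).
import Mathlib
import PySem

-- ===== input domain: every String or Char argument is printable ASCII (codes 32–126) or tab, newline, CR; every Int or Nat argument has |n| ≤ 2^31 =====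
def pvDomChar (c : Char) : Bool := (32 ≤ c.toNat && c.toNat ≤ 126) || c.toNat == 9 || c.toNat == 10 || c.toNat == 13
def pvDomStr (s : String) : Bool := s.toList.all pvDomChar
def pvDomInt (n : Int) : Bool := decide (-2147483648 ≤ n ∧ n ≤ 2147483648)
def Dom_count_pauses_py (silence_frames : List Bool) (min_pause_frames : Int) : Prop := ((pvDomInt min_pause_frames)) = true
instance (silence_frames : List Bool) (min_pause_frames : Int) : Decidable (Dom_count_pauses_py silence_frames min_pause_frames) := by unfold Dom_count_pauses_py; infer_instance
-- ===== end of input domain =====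

-- B replaces A's stateful scan by building the (value, run-length) groups first (itertools.groupby)
-- and counting the qualifying silent groups among all but the last; objective: idiomatic, same cost.

-- ===== PORT A =====
-- one loop step of A: state = (count, in_pause, pause_len)
def pvStepA (min_pause_frames : Int) (st : Int × Bool × Int) (is_silent : Bool) : Int × Bool × Int :=
  match st with
  | (count, in_pause, pause_len) =>
    if is_silent then (count, true, pause_len + 1)
    else (if in_pause && decide (min_pause_frames ≤ pause_len) then count + 1 else count, false, 0)

def count_pauses_py (silence_frames : List Bool) (min_pause_frames : Int) : Int :=
  (silence_frames.foldl (pvStepA min_pause_frames) (0, false, 0)).1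

-- ===== PORT B =====
-- groupby: prepend one element to an existing group list, merging with a leading equal-valued run
def pvConsRun (x : Bool) (n : Int) (R : List (Bool × Int)) : List (Bool × Int) :=
  match R with
  | (y, m) :: rest => if x == y then (x, n + m) :: rest else (x, n) :: (y, m) :: rest
  | [] => [(x, n)]

-- the (value, run-length) groups of the list, as itertools.groupby yields them
def pvGroups (xs : List Bool) : List (Bool × Int) :=
  xs.foldr (fun x R => pvConsRun x 1 R) []

def count_pauses_py_alt (silence_frames : List Bool) (min_pause_frames : Int) : Int :=
  ((pvGroups silence_frames).dropLast.countP
      (fun r => r.1 && decide (min_pause_frames ≤ r.2)) : Nat)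

-- ===== PRECONDITION & SPEC =====
def Spec_count_pauses_py (silence_frames : List Bool) (min_pause_frames : Int) (out : Int) : Prop := out = count_pauses_py_alt silence_frames min_pause_frames
instance (silence_frames : List Bool) (min_pause_frames : Int) (out : Int) : Decidable (Spec_count_pauses_py silence_frames min_pause_frames out) := by unfold Spec_count_pauses_py; infer_instance

-- ===== CLAIM (what is proved, stated in full; the proofs are below) =====
def Claim_equal_count_pauses_py : Prop := ∀ (silence_frames : List Bool) (min_pause_frames : Int), Dom_count_pauses_py silence_frames min_pause_frames → Spec_count_pauses_py silence_frames min_pause_frames (count_pauses_py silence_frames min_pause_frames)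

-- ===== LEMMAS AND PROOFS =====

-- A's count as a function of remaining frames and pending silent-run length
def pvG (k : Int) : List Bool → Int → Int
  | [], _ => 0
  | x :: xs, pl =>
    if x then pvG k xs (pl + 1)
    else (if 0 < pl ∧ k ≤ pl then 1 else 0) + pvG k xs 0

-- B's count applied to a group list
def pvCountDL (k : Int) (R : List (Bool × Int)) : Int :=
  (R.dropLast.countP (fun r => r.1 && decide (k ≤ r.2)) : Nat)

-- pending silent run as a (possibly absent) leading group
def pvConsRun' (pl : Int) (R : List (Bool × Int)) : List (Bool × Int) :=
  if pl = 0 then R else pvConsRun true pl R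

lemma pvFoldA (k : Int) (xs : List Bool) : ∀ (c pl : Int), 0 ≤ pl →
    (xs.foldl (pvStepA k) (c, decide (0 < pl), pl)).1 = c + pvG k xs pl := by
  induction xs with
  | nil => intro c pl _; simp [pvG]
  | cons x xs ih =>
    intro c pl hpl
    cases x with
    | true =>
      have h1 : (decide (0 < pl + 1) : Bool) = true := by simp only [decide_eq_true_eq]; omega
      have hs : pvStepA k (c, decide (0 < pl), pl) true = (c, decide (0 < pl + 1), pl + 1) := by
        simp [pvStepA, hpl]
      rw [List.foldl_cons, hs, ih c (pl + 1) (by omega)]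
      simp [pvG]
    | false =>
      have hs : pvStepA k (c, decide (0 < pl), pl) false =
          ((if decide (0 < pl) && decide (k ≤ pl) then c + 1 else c), decide (0 < (0:Int)), 0) := by
        simp [pvStepA]
      rw [List.foldl_cons, hs, ih _ 0 le_rfl]
      by_cases h : 0 < pl ∧ k ≤ pl
      · simp [pvG, h.1, h.2]; ring
      · have hb : (decide (0 < pl) && decide (k ≤ pl)) = false := by
          rcases not_and_or.mp h with h' | h' <;> simp [h']
        simp [pvG, hb, h]

lemma pvShift (pl : Int) (hpl : 0 ≤ pl) (R : List (Bool × Int)) :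
    pvConsRun' pl (pvConsRun true 1 R) = pvConsRun' (pl + 1) R := by
  by_cases h : pl = 0
  · subst h; simp [pvConsRun']
  · have h1 : pl + 1 ≠ 0 := by omega
    cases R with
    | nil => simp [pvConsRun', pvConsRun, h, h1]
    | cons r rest =>
      obtain ⟨y, m⟩ := r
      cases y with
      | true => simp [pvConsRun', pvConsRun, h, h1]; ring
      | false => simp [pvConsRun', pvConsRun, h, h1]

lemma pvCountConsFalse (k n : Int) (R : List (Bool × Int)) :
    pvCountDL k (pvConsRun false n R) = pvCountDL k R := by
  cases R with
  | nil => simp [pvConsRun, pvCountDL]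
  | cons r rest =>
    obtain ⟨y, m⟩ := r
    cases y with
    | true =>
      cases rest with
      | nil => simp [pvConsRun, pvCountDL]
      | cons s t => simp [pvConsRun, pvCountDL, List.dropLast]
    | false =>
      cases rest with
      | nil => simp [pvConsRun, pvCountDL]
      | cons s t => simp [pvConsRun, pvCountDL, List.dropLast]

lemma pvHeadFalse (n : Int) (R : List (Bool × Int)) :
    ∃ m t, pvConsRun false n R = (false, m) :: t := by
  cases R with
  | nil => exact ⟨n, [], rfl⟩
  | cons r rest =>
    obtain ⟨y, m⟩ := r
    cases y with
    | true => exact ⟨n, _, rfl⟩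
    | false => exact ⟨n + m, rest, by simp [pvConsRun]⟩

lemma pvGEqGroups (k : Int) (xs : List Bool) : ∀ (pl : Int), 0 ≤ pl →
    pvG k xs pl = pvCountDL k (pvConsRun' pl (pvGroups xs)) := by
  induction xs with
  | nil =>
    intro pl _
    by_cases h : pl = 0 <;> simp [pvG, pvGroups, pvConsRun', pvConsRun, pvCountDL, h]
  | cons x xs ih =>
    intro pl hpl
    cases x with
    | true =>
      have hg : pvGroups (true :: xs) = pvConsRun true 1 (pvGroups xs) := rfl
      rw [hg, pvShift pl hpl]
      simpa [pvG] using ih (pl + 1) (by omega)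
    | false =>
      have hg : pvGroups (false :: xs) = pvConsRun false 1 (pvGroups xs) := rfl
      rw [hg]
      by_cases h : pl = 0
      · subst h
        rw [show pvConsRun' 0 (pvConsRun false 1 (pvGroups xs))
              = pvConsRun false 1 (pvGroups xs) from if_pos rfl]
        rw [pvCountConsFalse]
        simpa [pvG] using ih 0 le_rfl
      · obtain ⟨m, t, he⟩ := pvHeadFalse 1 (pvGroups xs)
        have hpl' : 0 < pl := lt_of_le_of_ne hpl (Ne.symm h)
        rw [pvConsRun', if_neg h, he]
        have hc : pvConsRun true pl ((false, m) :: t) = (true, pl) :: (false, m) :: t := by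
          simp [pvConsRun]
        have hcount : pvCountDL k ((true, pl) :: (false, m) :: t)
            = (if k ≤ pl then 1 else 0) + pvCountDL k ((false, m) :: t) := by
          simp [pvCountDL, List.dropLast, List.countP_cons]
          by_cases hk : k ≤ pl
          · simp [hk]; ring
          · simp [hk]
        rw [hc, hcount, ← he, pvCountConsFalse]
        have hih := ih 0 le_rfl
        rw [show pvConsRun' 0 (pvGroups xs) = pvGroups xs from if_pos rfl] at hih
        simp [pvG, hih, hpl']

-- ===== VERDICT (by name: the statement is the Claim_ definition above) =====
theorem count_pauses_py_spec : Claim_equal_count_pauses_py := by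
  intro sf k _
  unfold Spec_count_pauses_py count_pauses_py count_pauses_py_alt
  have h0 : ((0:Int), false, (0:Int)) = ((0:Int), decide (0 < (0:Int)), (0:Int)) := by decide
  rw [h0, pvFoldA k sf 0 0 le_rfl, pvGEqGroups k sf 0 le_rfl]
  simp [pvConsRun', pvCountDL]
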